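-- pv_equiv track=rewrite | github.com/oldmantran/agile-backlog-automation | utils/domain_relevance_scorer.py | _count_term_matches
-- ===== SOURCE A (Python) =====
-- from typing import Dict, List, Tuple
--
-- def _count_term_matches(text: str, terms: List[str]) -> int:
--     """Count how many terms appear in the text."""
--     if not terms:
--         return 0
--
--     matches = 0
--     for term in terms:
--         # Check for word boundaries to avoid partial matches
--         if term.lower() in text:
--             matches += 1
--
--     return matches
-- ===== SOURCE B (Python) =====
-- def _count_term_matches(text, terms):
--     """Count how many terms appear in the text.
--
--     Groups the terms by their lowercased form first, then performs one
--     substring test per DISTINCT lowered term and adds its multiplicity.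
--     """
--     counts = {}
--     for term in terms:
--         key = term.lower()
--         counts[key] = counts.get(key, 0) + 1
--     matches = 0
--     for key, c in counts.items():
--         if key in text:
--             matches += c
--     return matches
-- ===== Notes on version B (the rewrite author's own statement) =====
-- stated objective: alternative
-- what changed: B first groups the terms into a dict keyed by their lowercased form with multiplicities, then performs a single substring test per distinct lowered term and sums the multiplicities, instead of A's one substring test per term.
import Mathlib
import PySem

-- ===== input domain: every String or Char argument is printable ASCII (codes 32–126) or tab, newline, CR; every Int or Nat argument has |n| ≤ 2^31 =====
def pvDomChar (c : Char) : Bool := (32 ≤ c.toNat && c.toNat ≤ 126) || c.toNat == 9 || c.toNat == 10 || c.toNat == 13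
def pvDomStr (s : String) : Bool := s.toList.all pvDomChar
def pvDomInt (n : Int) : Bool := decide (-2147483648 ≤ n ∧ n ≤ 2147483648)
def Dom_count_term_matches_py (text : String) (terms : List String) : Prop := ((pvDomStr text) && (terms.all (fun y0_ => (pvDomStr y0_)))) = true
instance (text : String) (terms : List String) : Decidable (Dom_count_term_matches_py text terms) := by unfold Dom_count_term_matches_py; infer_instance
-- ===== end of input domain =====

-- B groups the terms into a multiplicity dict keyed by the lowercased term and then does
-- one substring test per distinct lowered term, instead of A's one test per term (alternative).


-- ===== PORT A =====
def count_term_matches_py (text : String) (terms : List String) : Int :=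
  if terms = [] then 0
  else
    terms.foldl
      (fun acc term =>
        if PySem.Str.isIn (PySem.Str.lower term) text then acc + 1 else acc)
      0

-- ===== PORT B =====
def count_term_matches_py_alt (text : String) (terms : List String) : Int :=
  let counts : PySem.Dict String Int :=
    terms.foldl
      (fun d term =>
        d.insert (PySem.Str.lower term) (d.getD (PySem.Str.lower term) 0 + 1))
      PySem.Dict.empty
  counts.items.foldl
    (fun acc kc => if PySem.Str.isIn kc.1 text then acc + kc.2 else acc)
    0

-- ===== PRECONDITION & SPEC =====
def Spec_count_term_matches_py (text : String) (terms : List String) (out : Int) : Prop := out = count_term_matches_py_alt text terms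
instance (text : String) (terms : List String) (out : Int) : Decidable (Spec_count_term_matches_py text terms out) := by unfold Spec_count_term_matches_py; infer_instance

-- ===== CLAIM (what is proved, stated in full; the proofs are below) =====
def Claim_equal_count_term_matches_py : Prop := ∀ (text : String) (terms : List String), Dom_count_term_matches_py text terms → Spec_count_term_matches_py text terms (count_term_matches_py text terms)

-- ===== LEMMAS AND PROOFS =====

-- countP splits into the occurrences of d and the rest
lemma countP_split_at (q : String → Bool) (d : String) (ls : List String) :
    (ls.countP q : Int)
      = (if q d then (ls.count d : Int) else 0)
        + ((ls.filter (fun x => !(x == d))).countP q : Int) := by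
  induction ls with
  | nil => simp
  | cons x ls ih =>
    by_cases hx : x = d
    · subst hx
      simp only [List.countP_cons, List.count_cons, List.filter_cons]
      cases hq : q x <;> simp [hq] at ih ⊢ <;> omega
    · have hbe : (x == d) = false := by simp [hx]
      simp only [List.countP_cons, List.count_cons, List.filter_cons, hbe]
      cases hq : q x <;> simp [hq] at ih ⊢ <;> omega

-- summing each key's multiplicity in ls over a nodup superlist D of ls, filtered by q, is countP q ls
lemma foldl_count_over_dedup (q : String → Bool) :
    ∀ (D ls : List String) (a : Int), D.Nodup → (∀ x ∈ ls, x ∈ D) →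
      D.foldl (fun acc k => if q k then acc + (ls.count k : Int) else acc) a
        = a + (ls.countP q : Int) := by
  intro D
  induction D with
  | nil =>
    intro ls a _ hsub
    have hls : ls = [] := List.eq_nil_iff_forall_not_mem.mpr (fun x hx => by simpa using hsub x hx)
    subst hls; simp
  | cons d D ih =>
    intro ls a hD hsub
    have hdD : d ∉ D := (List.nodup_cons.mp hD).1
    have hDnd : D.Nodup := (List.nodup_cons.mp hD).2
    have hsub' : ∀ x ∈ ls.filter (fun x => !(x == d)), x ∈ D := by
      intro x hx
      have hxl : x ∈ ls := List.mem_of_mem_filter hx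
      have hxd : ¬ (x == d) = true := by
        have := List.of_mem_filter hx; simpa using this
      rcases List.mem_cons.mp (hsub x hxl) with h | h
      · exact absurd (by simp [h]) hxd
      · exact h
    have hcnt : ∀ k ∈ D, (ls.count k : Int) = ((ls.filter (fun x => !(x == d))).count k : Int) := by
      intro k hk
      have hkd : k ≠ d := fun h => hdD (h ▸ hk)
      rw [List.count_filter (by simp [hkd])]
    rw [List.foldl_cons]
    have hcg := PySem.List.foldl_congr_mem D
      (fun acc k => if q k then acc + (ls.count k : Int) else acc)
      (fun acc k => if q k then acc + ((ls.filter (fun x => !(x == d))).count k : Int) else acc)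
      (if q d then a + (ls.count d : Int) else a)
      (by intro acc x hx; by_cases hq : q x <;> simp [hq, hcnt x hx])
    rw [hcg, ih (ls.filter (fun x => !(x == d))) _ hDnd hsub', countP_split_at q d ls]
    by_cases hq : q d <;> simp [hq] <;> ring

-- ===== VERDICT (by name: the statement is the Claim_ definition above) =====
theorem count_term_matches_py_spec : Claim_equal_count_term_matches_py := by
  intro text terms _
  unfold Spec_count_term_matches_py
  have haux : ∀ (ts : List String) (d0 : PySem.Dict String Int),
      ts.foldl
        (fun d term =>
          d.insert (PySem.Str.lower term) (d.getD (PySem.Str.lower term) 0 + 1)) d0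
        = (ts.map PySem.Str.lower).foldl
            (fun d k => d.insert k (d.getD k 0 + 1)) d0 := by
    intro ts
    induction ts with
    | nil => intro d0; rfl
    | cons t ts ih => intro d0; simp [List.foldl_cons, ih]
  have hcounts :
      terms.foldl
        (fun d term =>
          d.insert (PySem.Str.lower term) (d.getD (PySem.Str.lower term) 0 + 1))
        PySem.Dict.empty = PySem.Dict.counter (terms.map PySem.Str.lower) := by
    rw [haux]
    exact PySem.Dict.foldl_insert_getD_add_one_eq_counter _
  simp only [count_term_matches_py_alt, hcounts, PySem.Dict.items_counter, List.foldl_map]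
  rw [foldl_count_over_dedup (fun k => PySem.Str.isIn k text)
        (PySem.Set.ofList (terms.map PySem.Str.lower)) (terms.map PySem.Str.lower) 0
        (PySem.Set.nodup_ofList _) (fun x hx => (PySem.Set.mem_ofList _ _).mpr hx),
      List.countP_map]
  unfold count_term_matches_py
  by_cases h : terms = []
  · subst h; simp
  · rw [if_neg h, PySem.List.foldl_if_add_one]
    simp [Function.comp_def, PySem.Str.toList_lower]
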